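-- pv_equiv track=rewrite | github.com/pypi-data/pypi-mirror-187 | packages/watchdata/watchdata-0.1.tar.gz/watchdata-0.1/watchdata.py | check_dict
-- ===== SOURCE A (Python) =====
-- from copy import deepcopy
--
-- wd_table = {
--     "repository_url":
--     f"https://raw.githubusercontent.com/swarthur/watchdata/",
--     "source_file_name": "./watchdata_source.json",
--     "local_file_name": "./watchdata_local.json",
--     "key_series_name": "series_name",
--     "key_seasons_episodes": "seasons_episodes",
--     "key_episode_duration": "episode_duration",
--     "key_episode_release_date": "episode_release_date",
--     "key_episode_name": "episode_name"}
--
-- def check_dict(series_dict: dict) -> tuple: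
--     """Check if the dictionnary is compatible with watchdata's environment.
--
--     Args:
--         series_dict (dict): dictionnary to check.
--
--     Returns:
--         tuple: tuple containing three main elements:
--             - bool if the dictionnary is fully compatible.
--             - corrected dictionnary.
--             - list containing the corrupted keys of the original dict.
--     """
--     corrupted_keys = []
--     dict_valid = True
--     correct_dict = deepcopy(series_dict)
--     for element in series_dict.keys():
--         dict_element = series_dict[element]
--         try:
--             if dict_element["type"] == "series":
--                 if dict_element.get(wd_table["key_series_name"]) != element:
--                     corrupted_keys.append(element)
--             elif dict_element["type"] == "metadata":
--                 corrupted_keys.append(element)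
--             else:
--                 corrupted_keys.append(element)
--         except KeyError:
--             corrupted_keys.append(element)
--     if len(corrupted_keys) != 0:
--         for corrupted_series in corrupted_keys:
--             del correct_dict[corrupted_series]
--         dict_valid = False
--     return dict_valid, correct_dict, corrupted_keys
-- ===== SOURCE B (Python) =====
-- from copy import deepcopy
--
-- def check_dict(series_dict: dict) -> tuple:
--     def ok(key, value):
--         return value.get("type") == "series" and value.get("series_name") == key
--
--     def split(items):
--         # divide and conquer: partition items into (valid pairs, corrupted keys)
--         if len(items) == 0:
--             return [], []
--         if len(items) == 1:
--             (k, v), = items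
--             if ok(k, v):
--                 return [(k, deepcopy(v))], []
--             return [], [k]
--         mid = len(items) // 2
--         lg, lb = split(items[:mid])
--         rg, rb = split(items[mid:])
--         return lg + rg, lb + rb
--
--     good, corrupted_keys = split(list(series_dict.items()))
--     return not corrupted_keys, dict(good), corrupted_keys
-- ===== Notes on version B (the rewrite author's own statement) =====
-- stated objective: alternative
-- what changed: Replaces A's linear copy-whole-dict-then-delete-corrupted-keys pass with a divide-and-conquer partition: the item list is split in halves recursively, each half returns its (valid pairs, corrupted keys), and the halves are concatenated; the cleaned dict is assembled from the valid pairs at the end.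
import Mathlib
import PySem

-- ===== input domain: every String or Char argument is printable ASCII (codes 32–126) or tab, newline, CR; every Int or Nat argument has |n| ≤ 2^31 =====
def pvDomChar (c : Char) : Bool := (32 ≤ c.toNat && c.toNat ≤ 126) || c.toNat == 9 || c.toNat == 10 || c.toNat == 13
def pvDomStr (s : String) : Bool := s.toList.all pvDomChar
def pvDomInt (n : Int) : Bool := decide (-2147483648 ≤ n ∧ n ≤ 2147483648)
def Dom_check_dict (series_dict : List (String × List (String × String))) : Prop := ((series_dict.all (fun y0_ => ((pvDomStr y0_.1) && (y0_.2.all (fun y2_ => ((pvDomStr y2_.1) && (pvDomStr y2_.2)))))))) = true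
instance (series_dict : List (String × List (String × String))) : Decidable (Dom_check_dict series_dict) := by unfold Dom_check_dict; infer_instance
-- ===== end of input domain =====

-- B replaces A's linear copy-then-delete pass with a divide-and-conquer partition of the
-- item list (alternative decomposition, similar cost).


-- ===== PORT A =====
-- literal port of A: iterate over keys, per-key try/branch chain, then deepcopy + delete loop
def check_dict (series_dict : List (String × List (String × String))) : Bool × (List (String × List (String × String))) × List String :=
  let d : PySem.Dict String (List (String × String)) := PySem.Dict.mk series_dict
  let corrupted_keys : List String :=
    d.keys.foldl (fun ck element =>
      match d.get? element with
      | none => ck  -- unreachable: element comes from d.keys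
      | some dict_element =>
        let de : PySem.Dict String String := PySem.Dict.mk dict_element
        match de.get? "type" with
        | none => ck ++ [element]  -- KeyError caught
        | some t =>
          if t == "series" then
            if !(de.get? "series_name" == some element) then ck ++ [element] else ck
          else if t == "metadata" then ck ++ [element]
          else ck ++ [element]) []
  let dict_valid := true
  let correct_dict : PySem.Dict String (List (String × String)) := PySem.Dict.mk series_dict  -- deepcopy
  if corrupted_keys.length ≠ 0 then
    (false, (corrupted_keys.foldl PySem.Dict.erase correct_dict).items, corrupted_keys)
  else
    (dict_valid, correct_dict.items, corrupted_keys)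

-- ===== PORT B =====
def pvOk (key : String) (value : List (String × String)) : Bool :=
  ((PySem.Dict.mk value).get? "type" == some "series") &&
  ((PySem.Dict.mk value).get? "series_name" == some key)

-- divide-and-conquer partition of the item list into (valid pairs, corrupted keys)
def pvSplit : List (String × List (String × String)) →
    List (String × List (String × String)) × List String
  | [] => ([], [])
  | [kv] => if pvOk kv.1 kv.2 then ([kv], []) else ([], [kv.1])
  | a :: b :: rest =>
    let xs := a :: b :: rest
    let mid := xs.length / 2
    let l := pvSplit (xs.take mid)
    let r := pvSplit (xs.drop mid)
    (l.1 ++ r.1, l.2 ++ r.2)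
termination_by xs => xs.length
decreasing_by
  · simp [List.length_take]; omega
  · simp; omega

def check_dict_alt (series_dict : List (String × List (String × String))) : Bool × (List (String × List (String × String))) × List String :=
  let gb := pvSplit series_dict
  -- dict(good): build a dict by inserting the valid pairs in order
  (gb.2.isEmpty, (gb.1.foldl (fun d kv => d.insert kv.1 kv.2) PySem.Dict.empty).items, gb.2)

-- ===== PRECONDITION & SPEC =====
-- Pre_ excludes association lists with duplicate top-level keys: a Python dict cannot contain
-- them (a duplicate-key literal collapses), so behaviour on such encodings is accidental.
def Pre_check_dict (series_dict : List (String × List (String × String))) : Prop :=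
  (series_dict.map Prod.fst).Nodup
instance (series_dict : List (String × List (String × String))) : Decidable (Pre_check_dict series_dict) := by unfold Pre_check_dict; infer_instance

def pvWitness_check_dict : (List (String × List (String × String))) :=
  [("a", [("type", "series"), ("series_name", "a")]), ("m", [("type", "metadata")])]

def Spec_check_dict (series_dict : List (String × List (String × String))) (out : Bool × (List (String × List (String × String))) × List String) : Prop := out = check_dict_alt series_dict
instance (series_dict : List (String × List (String × String))) (out : Bool × (List (String × List (String × String))) × List String) : Decidable (Spec_check_dict series_dict out) := by unfold Spec_check_dict; infer_instance

-- ===== CLAIM (what is proved, stated in full; the proofs are below) =====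
def Claim_equal_check_dict : Prop := ∀ (series_dict : List (String × List (String × String))), Dom_check_dict series_dict → Pre_check_dict series_dict → Spec_check_dict series_dict (check_dict series_dict)

-- ===== LEMMAS AND PROOFS =====

-- B's divide-and-conquer split computes the two filters
theorem pvSplit_eq (xs : List (String × List (String × String))) :
    pvSplit xs = (xs.filter (fun kv => pvOk kv.1 kv.2),
                  (xs.filter (fun kv => !pvOk kv.1 kv.2)).map Prod.fst) := by
  induction xs using pvSplit.induct with
  | case1 => simp [pvSplit]
  | case2 kv h => simp [pvSplit, h, List.filter]
  | case3 kv h => simp [pvSplit, h, List.filter]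
  | case4 a b rest xs mid ihl ihr =>
    rw [pvSplit]
    rw [show mid = (a :: b :: rest).length / 2 from rfl, show xs = a :: b :: rest from rfl] at ihl ihr
    rw [ihl, ihr]
    conv_rhs => rw [← List.take_append_drop ((a :: b :: rest).length / 2) (a :: b :: rest)]
    rw [List.filter_append, List.filter_append, List.map_append]

-- a sequence of dict-erases is one filter over the items
theorem foldl_erase_items (ks : List String) (d : PySem.Dict String (List (String × String))) :
    (ks.foldl PySem.Dict.erase d).items = d.items.filter (fun p => !ks.contains p.1) := by
  induction ks generalizing d with
  | nil => simp
  | cons k ks ih =>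
    simp only [List.foldl_cons, ih, PySem.Dict.erase, List.filter_filter]
    apply List.filter_congr
    intro p _
    simp [Bool.not_or, Bool.and_comm, beq_eq_decide]

-- with unique keys, A's per-key loop computes exactly the keys of the invalid entries
theorem corrupted_eq (sd : List (String × List (String × String)))
    (hnd : (sd.map Prod.fst).Nodup) :
    (PySem.Dict.mk sd).keys.foldl (fun ck element =>
      match (PySem.Dict.mk sd).get? element with
      | none => ck
      | some dict_element =>
        let de : PySem.Dict String String := PySem.Dict.mk dict_element
        match de.get? "type" with
        | none => ck ++ [element]
        | some t =>
          if t == "series" then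
            if !(de.get? "series_name" == some element) then ck ++ [element] else ck
          else if t == "metadata" then ck ++ [element]
          else ck ++ [element]) []
    = (sd.filter (fun kv => !pvOk kv.1 kv.2)).map Prod.fst := by
  have hkeys : (PySem.Dict.mk sd).keys = sd.map Prod.fst := rfl
  rw [hkeys, List.foldl_map]
  rw [PySem.List.foldl_congr_mem sd _
      (fun ck kv => if !pvOk kv.1 kv.2 then ck ++ [kv.1] else ck) []
      (by
        intro acc kv hmem
        have hget : (PySem.Dict.mk sd).get? kv.1 = some kv.2 :=
          PySem.Dict.get?_of_mem_items _ hmem hnd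
        simp only [hget]
        unfold pvOk
        cases ht : (PySem.Dict.mk kv.2).get? "type" with
        | none => simp
        | some t =>
          by_cases hs : t = "series"
          · subst hs
            cases hn : (PySem.Dict.mk kv.2).get? "series_name" == some kv.1 <;>
              simp
          · have h1 : (t == "series") = false := by simp [hs]
            by_cases hm : t = "metadata" <;> simp [h1, hm])]
  exact PySem.List.foldl_append_if _ _ sd []

-- ===== VERDICT (by name: the statement is the Claim_ definition above) =====
theorem check_dict_spec : Claim_equal_check_dict := by
  intro sd _ hnd
  unfold Spec_check_dict check_dict check_dict_alt
  simp only [corrupted_eq sd hnd, pvSplit_eq]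
  -- B's dict(good): valid pairs have distinct fresh keys, so the insert loop appends them
  have hgoodkeys : ((sd.filter (fun kv => pvOk kv.1 kv.2)).map Prod.fst).Nodup :=
    (hnd.sublist ((List.filter_sublist (l := sd)).map Prod.fst) : _)
  have hbuild : ((sd.filter (fun kv => pvOk kv.1 kv.2)).foldl
        (fun d kv => d.insert kv.1 kv.2) PySem.Dict.empty).items
      = sd.filter (fun kv => pvOk kv.1 kv.2) := by
    have := PySem.Dict.items_foldl_insert_fresh (d := PySem.Dict.empty)
      (l := sd.filter (fun kv => pvOk kv.1 kv.2)) (k := Prod.fst) (v := Prod.snd)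
      (by intro a _; rfl) hgoodkeys
    simpa using this
  by_cases hempty : (sd.filter (fun kv => !pvOk kv.1 kv.2)).map Prod.fst = []
  · -- no corrupted keys: A returns the untouched dict, B's split keeps everything
    have hfil : sd.filter (fun kv => !pvOk kv.1 kv.2) = [] := by
      simpa using hempty
    have hall : ∀ kv ∈ sd, pvOk kv.1 kv.2 = true := by
      intro kv hkv
      by_contra h
      have : kv ∈ sd.filter (fun kv => !pvOk kv.1 kv.2) :=
        List.mem_filter.mpr ⟨hkv, by simp [Bool.eq_false_iff.mpr h]⟩
      simp [hfil] at this
    have hkeep : sd.filter (fun kv => pvOk kv.1 kv.2) = sd :=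
      List.filter_eq_self.mpr hall
    rw [hkeep] at hbuild
    simp [hfil, hkeep, hbuild]
  · -- some corrupted keys: the erase loop is one filter, matching B's split
    have hlen : ((sd.filter (fun kv => !pvOk kv.1 kv.2)).map Prod.fst).length ≠ 0 := by
      simpa [List.length_eq_zero_iff] using hempty
    have hbool : ((sd.filter (fun kv => !pvOk kv.1 kv.2)).map Prod.fst).isEmpty = false := by
      exact List.isEmpty_eq_false_iff.mpr hempty
    rw [if_pos hlen, hbool]
    simp only [Prod.mk.injEq]
    refine ⟨trivial, ?_, trivial⟩
    rw [foldl_erase_items, hbuild]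
    show sd.filter _ = _
    apply List.filter_congr
    intro p hp
    have : ((sd.filter (fun kv => !pvOk kv.1 kv.2)).map Prod.fst).contains p.1
        = !pvOk p.1 p.2 := by
      cases hv : pvOk p.1 p.2 with
      | true =>
        simp only [Bool.not_true]
        rw [List.contains_eq_any_beq]
        simp only [List.any_eq_false]
        intro x hx
        simp only [List.mem_map, List.mem_filter] at hx
        obtain ⟨q, ⟨hqmem, hqbad⟩, hq1⟩ := hx
        subst hq1
        intro hbe
        have heq : p.1 = q.1 := eq_of_beq hbe
        have hqp : q = p := List.inj_on_of_nodup_map hnd hqmem hp heq.symm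
        subst hqp
        simp [hv] at hqbad
      | false =>
        simp only [Bool.not_false]
        rw [List.contains_eq_any_beq]
        simp only [List.any_eq_true]
        refine ⟨p.1, List.mem_map_of_mem (List.mem_filter.mpr ⟨hp, by simp [hv]⟩), by simp⟩
    rw [this]
    cases pvOk p.1 p.2 <;> simp
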